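-- pv_equiv track=rewrite | github.com/hyungmogu/ctci | pramp/algorithm/busiest_time_in_the_mall/busiest_time_in_the_mall.py | find_busiest_period
-- ===== SOURCE A (Python) =====
-- def find_busiest_period(data):
--   current_best_num_people = 0
--   current_best_epoch = 0
--
--   current_num_people = 0
--   for idx, element in enumerate(data):
--     if element[2] == 0:
--       current_num_people -= element[1]
--     else:
--       current_num_people += element[1]
--
--     if is_at_the_end_of_epoch(data,idx):
--       if current_best_num_people < current_num_people:
--         current_best_num_people = current_num_people
--         current_best_epoch = element[0]
--   return current_best_epoch
--
-- def is_at_the_end_of_epoch(data,idx):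
--   try:
--     if data[idx+1][0] == data[idx][0]:
--       return False
--     return True
--   except:
--     return True
-- ===== SOURCE B (Python) =====
-- def find_busiest_period(data):
--     # stage 1: occupancy level after each event
--     occ = []
--     running = 0
--     for e in data:
--         running += e[1] if e[2] else -e[1]
--         occ.append(running)
--     # stage 2: keep the occupancy at the last event of each run of equal timestamps
--     cands = []
--     prev = None
--     for e, c in zip(data, occ):
--         if prev is not None and prev[0] != e[0]:
--             cands.append(prev)
--         prev = (e[0], c)
--     if prev is not None:
--         cands.append(prev)
--     # stage 3: the first timestamp attaining the positive maximum occupancy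
--     if not cands:
--         return 0
--     m = max(c for _, c in cands)
--     if m <= 0:
--         return 0
--     for t, c in cands:
--         if c == m:
--             return t
-- ===== Notes on version B (the rewrite author's own statement) =====
-- stated objective: alternative
-- what changed: Replaces A's single running-best pass with try/except look-ahead by three staged passes: a prefix-sum occupancy list, an emit-previous-on-timestamp-change candidate list, and a global max() followed by a first-match search instead of a running best.
import Mathlib
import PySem

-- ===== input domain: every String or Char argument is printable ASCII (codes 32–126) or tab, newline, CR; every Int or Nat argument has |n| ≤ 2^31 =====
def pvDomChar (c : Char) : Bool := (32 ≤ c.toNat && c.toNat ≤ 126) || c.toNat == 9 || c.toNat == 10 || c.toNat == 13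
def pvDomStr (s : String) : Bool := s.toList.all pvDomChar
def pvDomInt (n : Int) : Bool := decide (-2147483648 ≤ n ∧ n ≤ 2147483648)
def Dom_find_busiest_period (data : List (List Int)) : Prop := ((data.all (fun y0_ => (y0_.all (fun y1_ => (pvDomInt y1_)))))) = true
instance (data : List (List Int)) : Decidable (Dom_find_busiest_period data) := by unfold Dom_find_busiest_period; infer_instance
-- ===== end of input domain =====

-- B replaces A's single running-best pass (with try/except look-ahead) by three staged
-- passes: prefix-sum occupancy list, emit-previous-on-timestamp-change candidate list,
-- then a global max followed by a first-match search (alternative decomposition, same O(n)).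

-- ===== PORT A =====
-- helper is_at_the_end_of_epoch: any raise (bare except) = none here, yielding True
def is_at_the_end_of_epoch (data : List (List Int)) (idx : Int) : Bool :=
  match (PySem.List.pyGet? data (idx + 1)).bind (fun r => PySem.List.pyGet? r 0),
        (PySem.List.pyGet? data idx).bind (fun r => PySem.List.pyGet? r 0) with
  | some a, some b => !(a == b)
  | _, _ => true

-- body of A's for-loop (state = (best, best_epoch, cur)); element accesses via pyGet?;
-- getD 0 is only reached where Python A would raise IndexError (excluded by Pre_)
def pvABody (data : List (List Int)) (st : Int × Int × Int) (p : Int × List Int) : Int × Int × Int :=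
  let best := st.1; let bestEpoch := st.2.1; let cur := st.2.2
  let cur' := if (PySem.List.pyGet? p.2 2).getD 0 == 0
              then cur - (PySem.List.pyGet? p.2 1).getD 0
              else cur + (PySem.List.pyGet? p.2 1).getD 0
  if is_at_the_end_of_epoch data p.1 then
    if best < cur' then (cur', (PySem.List.pyGet? p.2 0).getD 0, cur')
    else (best, bestEpoch, cur')
  else (best, bestEpoch, cur')

def find_busiest_period (data : List (List Int)) : Int :=
  ((PySem.List.enumerate data 0).foldl (pvABody data) (0, 0, 0)).2.1

-- ===== PORT B =====
def pvT (r : List Int) : Int := (PySem.List.pyGet? r 0).getD 0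
-- Source B: e[1] if e[2] else -e[1]
def pvDelta (r : List Int) : Int :=
  if (PySem.List.pyGet? r 2).getD 0 == 0 then -(PySem.List.pyGet? r 1).getD 0
  else (PySem.List.pyGet? r 1).getD 0

-- stage 1 of Source B: occupancy after each event (running prefix sums, list built by append)
def pvStage1 (data : List (List Int)) : List Int :=
  (data.foldl (fun st e => (st.1 + pvDelta e, st.2 ++ [st.1 + pvDelta e])) ((0 : Int), ([] : List Int))).2

-- stage 2 of Source B: loop body over zip(data, occ) with state (cands, prev)
def pvStage2Step (st : List (Int × Int) × Option (Int × Int)) (z : List Int × Int) :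
    List (Int × Int) × Option (Int × Int) :=
  let cands := match st.2 with
    | some p => if p.1 != pvT z.1 then st.1 ++ [p] else st.1
    | none => st.1
  (cands, some (pvT z.1, z.2))

def pvStage2 (data : List (List Int)) (occ : List Int) : List (Int × Int) :=
  let r := (List.zip data occ).foldl pvStage2Step ([], none)
  match r.2 with
  | some p => r.1 ++ [p]
  | none => r.1

-- stage 3 of Source B: Python max over the candidates' occupancies …
def pvMaxSnd (m : Int) (l : List (Int × Int)) : Int := l.foldl (fun a p => max a p.2) m
-- … then the first candidate attaining it (base case [] is unreachable: m is the max of a nonempty list)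
def pvFirstWith (m : Int) : List (Int × Int) → Int
  | [] => 0
  | p :: rest => if p.2 == m then p.1 else pvFirstWith m rest

def find_busiest_period_alt (data : List (List Int)) : Int :=
  let occ := pvStage1 data
  let cands := pvStage2 data occ
  match cands with
  | [] => 0
  | c :: cs =>
    let m := pvMaxSnd c.2 cs
    if m ≤ 0 then 0 else pvFirstWith m (c :: cs)

-- ===== PRECONDITION & SPEC =====
-- Pre_ excludes rows with fewer than 3 entries, on which Python A raises IndexError.
def Pre_find_busiest_period (data : List (List Int)) : Prop :=
  ∀ r ∈ data, 3 ≤ r.length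
instance (data : List (List Int)) : Decidable (Pre_find_busiest_period data) := by
  unfold Pre_find_busiest_period; infer_instance

def pvWitness_find_busiest_period : List (List Int) := [[1, 2, 1], [1, 1, 0], [3, 4, 1]]

def Spec_find_busiest_period (data : List (List Int)) (out : Int) : Prop := out = find_busiest_period_alt data
instance (data : List (List Int)) (out : Int) : Decidable (Spec_find_busiest_period data out) := by unfold Spec_find_busiest_period; infer_instance

-- ===== CLAIM (what is proved, stated in full; the proofs are below) =====
def Claim_equal_find_busiest_period : Prop := ∀ (data : List (List Int)), Dom_find_busiest_period data → Pre_find_busiest_period data → Spec_find_busiest_period data (find_busiest_period data)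

-- ===== LEMMAS AND PROOFS =====

-- structural middle-man: A's loop, one element at a time, look-ahead by pattern match
def pvALoop : List (List Int) → Int × Int × Int → Int × Int × Int
  | [], st => st
  | x :: rest, (b, e, c) =>
    let c' := c + pvDelta x
    pvALoop rest
      (match rest with
       | [] => if b < c' then (c', pvT x, c') else (b, e, c')
       | y :: _ => if pvT y == pvT x then (b, e, c')
                   else if b < c' then (c', pvT x, c') else (b, e, c'))

lemma foldA_eq_pvALoop :
    ∀ (suffix pre : List (List Int)) (st : Int × Int × Int),
      (∀ r ∈ pre ++ suffix, r ≠ []) →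
      (PySem.List.enumerate suffix (pre.length : Int)).foldl (pvABody (pre ++ suffix)) st
        = pvALoop suffix st := by
  intro suffix
  induction suffix with
  | nil => intro pre st h; simp [PySem.List.enumerate_nil, pvALoop]
  | cons x rest ih =>
    intro pre st h
    obtain ⟨b, e, c⟩ := st
    rw [PySem.List.enumerate_cons, List.foldl_cons]
    have hx : x ≠ [] := h x (by simp)
    have hgx : PySem.List.pyGet? x 0 = some (pvT x) := by
      cases x with
      | nil => exact absurd rfl hx
      | cons a t => simp [pvT]
    have hcur : PySem.List.pyGet? (pre ++ x :: rest) (pre.length : Int) = some x :=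
      PySem.List.pyGet?_append_length pre rest x
    have hnext : PySem.List.pyGet? (pre ++ x :: rest) ((pre.length : Int) + 1)
        = rest[0]? := by
      have : pre ++ x :: rest = (pre ++ [x]) ++ rest := by simp
      rw [this]
      have hl : ((pre.length : Int) + 1) = ((pre ++ [x]).length : Int) + (0 : Nat) := by
        simp
      rw [hl]
      exact PySem.List.pyGet?_append_right (pre ++ [x]) rest 0
    have hbody : pvABody (pre ++ x :: rest) (b, e, c) ((pre.length : Int), x)
        = (match rest with
           | [] => if b < c + pvDelta x then (c + pvDelta x, pvT x, c + pvDelta x) else (b, e, c + pvDelta x)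
           | y :: _ => if pvT y == pvT x then (b, e, c + pvDelta x)
                       else if b < c + pvDelta x then (c + pvDelta x, pvT x, c + pvDelta x) else (b, e, c + pvDelta x)) := by
      have hc' : (if (PySem.List.pyGet? x 2).getD 0 == 0
                  then c - (PySem.List.pyGet? x 1).getD 0
                  else c + (PySem.List.pyGet? x 1).getD 0) = c + pvDelta x := by
        unfold pvDelta; split_ifs <;> ring
      cases rest with
      | nil =>
        have hend : is_at_the_end_of_epoch (pre ++ [x]) (pre.length : Int) = true := by
          unfold is_at_the_end_of_epoch
          have : PySem.List.pyGet? (pre ++ [x]) ((pre.length : Int) + 1) = none := by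
            rw [show pre ++ [x] = (pre ++ [x]) ++ ([] : List (List Int)) by simp]
            have hl : ((pre.length : Int) + 1) = (((pre ++ [x]).length : Int)) + (0 : Nat) := by simp
            rw [hl, PySem.List.pyGet?_append_right (pre ++ [x]) [] 0]; rfl
          rw [this]; rfl
        simp only [pvABody, hend, hc']
        simp [hgx]
      | cons y rest' =>
        have hy : y ≠ [] := h y (by simp)
        have hgy : PySem.List.pyGet? y 0 = some (pvT y) := by
          cases y with
          | nil => exact absurd rfl hy
          | cons a t => simp [pvT]
        have hend : is_at_the_end_of_epoch (pre ++ x :: y :: rest') (pre.length : Int)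
            = !(pvT y == pvT x) := by
          unfold is_at_the_end_of_epoch
          rw [hnext]
          simp [Option.bind, hgy, hcur, hgx]
        simp only [pvABody, hend, hc', hgx]
        by_cases hty : pvT y == pvT x <;> simp [hty]
    rw [hbody]
    have henum : PySem.List.enumerate rest ((pre.length : Int) + 1)
        = PySem.List.enumerate rest (((pre ++ [x]).length : Int)) := by
      simp
    rw [henum, show pre ++ x :: rest = (pre ++ [x]) ++ rest by simp]
    rw [ih (pre ++ [x]) _ (by simpa using h)]
    cases rest <;> rfl

-- the boundary candidates (timestamp, occupancy) with running offset c, by look-ahead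
def pvCandsA : List (List Int) → Int → List (Int × Int)
  | [], _ => []
  | x :: rest, c =>
    let c' := c + pvDelta x
    match rest with
    | [] => [(pvT x, c')]
    | y :: _ => if pvT y == pvT x then pvCandsA rest c' else (pvT x, c') :: pvCandsA rest c'

-- A's running-best selection over a candidate list
def pvSelect : Int → Int → List (Int × Int) → Int
  | _, e, [] => e
  | b, e, (t, v) :: rest => if b < v then pvSelect v t rest else pvSelect b e rest

lemma pvALoop_single (x : List Int) (b e c : Int) :
    pvALoop [x] (b, e, c)
      = (if b < c + pvDelta x then (c + pvDelta x, pvT x, c + pvDelta x)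
         else (b, e, c + pvDelta x)) := rfl

lemma pvALoop_cons_cons (x y : List Int) (rest : List (List Int)) (b e c : Int) :
    pvALoop (x :: y :: rest) (b, e, c)
      = pvALoop (y :: rest)
          (if pvT y == pvT x then (b, e, c + pvDelta x)
           else if b < c + pvDelta x then (c + pvDelta x, pvT x, c + pvDelta x)
           else (b, e, c + pvDelta x)) := rfl

lemma pvCandsA_single (x : List Int) (c : Int) :
    pvCandsA [x] c = [(pvT x, c + pvDelta x)] := rfl

lemma pvCandsA_cons_cons (x y : List Int) (rest : List (List Int)) (c : Int) :
    pvCandsA (x :: y :: rest) c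
      = (if pvT y == pvT x then pvCandsA (y :: rest) (c + pvDelta x)
         else (pvT x, c + pvDelta x) :: pvCandsA (y :: rest) (c + pvDelta x)) := rfl

lemma pvSelect_cons (b e t v : Int) (rest : List (Int × Int)) :
    pvSelect b e ((t, v) :: rest)
      = (if b < v then pvSelect v t rest else pvSelect b e rest) := rfl

lemma pvFirstWith_cons (m t v : Int) (rest : List (Int × Int)) :
    pvFirstWith m ((t, v) :: rest)
      = (if v == m then t else pvFirstWith m rest) := rfl

lemma pvALoop_eq_select :
    ∀ (l : List (List Int)) (b e c : Int),
      (pvALoop l (b, e, c)).2.1 = pvSelect b e (pvCandsA l c) := by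
  intro l
  induction l with
  | nil => intro b e c; simp [pvALoop, pvCandsA, pvSelect]
  | cons x rest ih =>
    intro b e c
    cases rest with
    | nil =>
      rw [pvALoop_single, pvCandsA_single, pvSelect_cons]
      split_ifs <;> simp [pvSelect]
    | cons y r2 =>
      rw [pvALoop_cons_cons, pvCandsA_cons_cons]
      by_cases hty : pvT y == pvT x
      · rw [if_pos hty, if_pos hty]
        exact ih b e (c + pvDelta x)
      · rw [if_neg hty, if_neg hty, pvSelect_cons]
        split_ifs with hb
        · exact ih (c + pvDelta x) (pvT x) (c + pvDelta x)
        · exact ih b e (c + pvDelta x)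

-- the prefix-sum occupancy list, recursively
def pvOccs : List (List Int) → Int → List Int
  | [], _ => []
  | x :: rest, c => (c + pvDelta x) :: pvOccs rest (c + pvDelta x)

lemma pvStage1_fold :
    ∀ (l : List (List Int)) (r : Int) (acc : List Int),
      (l.foldl (fun st e => (st.1 + pvDelta e, st.2 ++ [st.1 + pvDelta e])) (r, acc)).2
        = acc ++ pvOccs l r := by
  intro l
  induction l with
  | nil => intro r acc; simp [pvOccs]
  | cons x rest ih =>
    intro r acc
    simp only [List.foldl_cons, pvOccs]
    rw [ih]
    simp

-- stage 2's loop once prev is set: emit prev on timestamp change, then the final append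
def pvEmit : List (List Int × Int) → Int × Int → List (Int × Int)
  | [], p => [p]
  | z :: rest, p =>
    if p.1 != pvT z.1 then p :: pvEmit rest (pvT z.1, z.2) else pvEmit rest (pvT z.1, z.2)

lemma pvStage2_fold :
    ∀ (zs : List (List Int × Int)) (acc : List (Int × Int)) (p : Int × Int),
      (match (zs.foldl pvStage2Step (acc, some p)).2 with
       | some q => (zs.foldl pvStage2Step (acc, some p)).1 ++ [q]
       | none => (zs.foldl pvStage2Step (acc, some p)).1)
        = acc ++ pvEmit zs p := by
  intro zs
  induction zs with
  | nil => intro acc p; simp [pvEmit]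
  | cons z rest ih =>
    intro acc p
    simp only [List.foldl_cons, pvEmit]
    by_cases hc : p.1 != pvT z.1
    · rw [show pvStage2Step (acc, some p) z = (acc ++ [p], some (pvT z.1, z.2)) by
        simp [pvStage2Step, hc]]
      rw [ih]
      simp [hc]
    · rw [show pvStage2Step (acc, some p) z = (acc, some (pvT z.1, z.2)) by
        simp [pvStage2Step, hc]]
      rw [ih]
      simp [hc]

lemma pvEmit_eq_candsA :
    ∀ (rest : List (List Int)) (x : List Int) (c : Int),
      pvEmit (List.zip rest (pvOccs rest (c + pvDelta x))) (pvT x, c + pvDelta x)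
        = pvCandsA (x :: rest) c := by
  intro rest
  induction rest with
  | nil => intro x c; simp [pvOccs, pvEmit, pvCandsA]
  | cons y r2 ih =>
    intro x c
    rw [pvCandsA_cons_cons]
    simp only [pvOccs, List.zip_cons_cons, pvEmit]
    by_cases hxy : pvT x = pvT y
    · have h1 : (pvT x != pvT y) = false := by simp [hxy]
      have h2 : (pvT y == pvT x) = true := by simp [hxy]
      simp only [h1, h2, Bool.false_eq_true, if_false, if_true]
      exact ih y (c + pvDelta x)
    · have h1 : (pvT x != pvT y) = true := by simp [hxy]
      have h2 : (pvT y == pvT x) = false := by simp [Ne.symm hxy]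
      simp only [h1, h2, Bool.false_eq_true, if_false, if_true]
      rw [ih y (c + pvDelta x)]

lemma pvMaxSnd_max :
    ∀ (l : List (Int × Int)) (a b : Int),
      pvMaxSnd (max a b) l = max a (pvMaxSnd b l) := by
  intro l
  induction l with
  | nil => intro a b; simp [pvMaxSnd]
  | cons q rest ih =>
    intro a b
    simp only [pvMaxSnd, List.foldl_cons]
    rw [max_assoc]
    exact ih a (max b q.2)

lemma pvSelect_eq_maxsel :
    ∀ (L : List (Int × Int)) (b e : Int),
      pvSelect b e L
        = (match L with
           | [] => e
           | c :: cs =>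
             if pvMaxSnd c.2 cs ≤ b then e else pvFirstWith (pvMaxSnd c.2 cs) (c :: cs)) := by
  intro L
  induction L with
  | nil => intro b e; simp [pvSelect]
  | cons tv rest ih =>
    intro b e
    obtain ⟨t, v⟩ := tv
    cases rest with
    | nil =>
      simp only [pvSelect, pvMaxSnd, List.foldl_nil, pvFirstWith]
      split_ifs with h1 h2 <;> simp_all <;> omega
    | cons tv2 r2 =>
      obtain ⟨t2, v2⟩ := tv2
      have hm : pvMaxSnd v ((t2, v2) :: r2) = max v (pvMaxSnd v2 r2) := by
        simp only [pvMaxSnd, List.foldl_cons]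
        have := pvMaxSnd_max r2 v v2
        simpa [pvMaxSnd] using this
      rw [pvSelect_cons]
      by_cases hb : b < v
      · rw [if_pos hb, ih v t]
        simp only [hm]
        by_cases h2 : pvMaxSnd v2 r2 ≤ v
        · have hmx : max v (pvMaxSnd v2 r2) = v := by omega
          rw [if_pos h2, hmx, if_neg (by omega)]
          simp [pvFirstWith]
        · have hmx : max v (pvMaxSnd v2 r2) = pvMaxSnd v2 r2 := by omega
          have hne : (v == pvMaxSnd v2 r2) = false := by
            rw [beq_eq_false_iff_ne]; omega
          rw [if_neg h2, hmx, if_neg (by omega)]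
          simp [pvFirstWith_cons, hne]
      · rw [if_neg hb, ih b e]
        simp only [hm]
        by_cases h2 : pvMaxSnd v2 r2 ≤ b
        · rw [if_pos h2, if_pos (by omega)]
        · have hmx : max v (pvMaxSnd v2 r2) = pvMaxSnd v2 r2 := by omega
          have hne : (v == pvMaxSnd v2 r2) = false := by
            rw [beq_eq_false_iff_ne]; omega
          rw [if_neg h2, hmx, if_neg (by omega)]
          simp [pvFirstWith_cons, hne]

lemma alt_eq_select (data : List (List Int)) :
    find_busiest_period_alt data = pvSelect 0 0 (pvCandsA data 0) := by
  rw [show find_busiest_period_alt data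
      = (match pvStage2 data (pvStage1 data) with
         | [] => (0 : Int)
         | c :: cs => if pvMaxSnd c.2 cs ≤ 0 then 0 else pvFirstWith (pvMaxSnd c.2 cs) (c :: cs))
      from rfl]
  have hcands : pvStage2 data (pvStage1 data) = pvCandsA data 0 := by
    cases data with
    | nil => simp [pvStage2, pvStage1, pvCandsA]
    | cons x rest =>
      unfold pvStage2 pvStage1
      rw [show (List.foldl (fun st e => (st.1 + pvDelta e, st.2 ++ [st.1 + pvDelta e]))
            ((0 : Int), ([] : List Int)) (x :: rest)).2 = pvOccs (x :: rest) 0 from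
        by simpa using pvStage1_fold (x :: rest) 0 []]
      simp only [pvOccs, List.zip_cons_cons, List.foldl_cons]
      rw [show pvStage2Step ([], none) (x, 0 + pvDelta x) = ([], some (pvT x, 0 + pvDelta x)) from rfl]
      rw [pvStage2_fold (List.zip rest (pvOccs rest (0 + pvDelta x))) [] (pvT x, 0 + pvDelta x)]
      simpa using pvEmit_eq_candsA rest x 0
  rw [hcands, pvSelect_eq_maxsel (pvCandsA data 0) 0 0]

-- ===== VERDICT (by name: the statement is the Claim_ definition above) =====
theorem find_busiest_period_spec : Claim_equal_find_busiest_period := by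
  intro data _ hpre
  unfold Spec_find_busiest_period
  show find_busiest_period data = find_busiest_period_alt data
  unfold find_busiest_period
  have hne : ∀ r ∈ ([] : List (List Int)) ++ data, r ≠ [] := by
    intro r hr hnil
    have := hpre r (by simpa using hr)
    simp [hnil] at this
  have h1 := foldA_eq_pvALoop data [] (0, 0, 0) hne
  simp only [List.nil_append, List.length_nil, Nat.cast_zero] at h1
  rw [h1, pvALoop_eq_select data 0 0 0, alt_eq_select data]
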